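-- pv_equiv track=rewrite | github.com/JSRG-73/Hill | Hill.py | removeblankspace
-- ===== SOURCE A (Python) =====
-- def removeblankspace(string):
--
--     string=string[::-1]
--     cont=0
--     for i in string:
--         if i==' ':
--             cont+=1
--         else:
--             break
--     string=string[cont:]
--     string=string[::-1]
--     return string
-- ===== SOURCE B (Python) =====
-- def removeblankspace(string):
--     i = len(string)
--     while i > 0 and string[i - 1] == ' ':
--         i -= 1
--     return string[:i]
-- ===== Notes on version B (the rewrite author's own statement) =====
-- stated objective: simpler
-- what changed: Replaces the reverse / count-leading-spaces / slice / reverse pipeline with a single backward end-index scan that never materializes a reversed copy.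
import Mathlib
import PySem

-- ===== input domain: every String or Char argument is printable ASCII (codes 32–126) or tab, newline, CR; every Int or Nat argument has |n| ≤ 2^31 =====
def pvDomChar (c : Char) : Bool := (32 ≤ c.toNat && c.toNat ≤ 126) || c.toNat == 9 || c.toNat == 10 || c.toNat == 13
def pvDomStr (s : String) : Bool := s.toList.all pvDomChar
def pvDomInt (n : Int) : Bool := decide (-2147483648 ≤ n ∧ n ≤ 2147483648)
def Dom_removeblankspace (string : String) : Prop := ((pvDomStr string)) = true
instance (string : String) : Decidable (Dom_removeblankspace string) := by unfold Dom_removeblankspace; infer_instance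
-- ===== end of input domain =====

-- B replaces A's reverse / count-leading-spaces / slice / reverse pipeline with a single
-- backward end-index scan returning string[:i]; same result, simpler (no reversed copies).


-- ===== PORT A =====
-- the 'for i in string: if i==' ': cont+=1 else: break' loop: counts leading spaces, break stops it
def pvCountLead : List Char → Nat
  | [] => 0
  | c :: cs => if c == ' ' then pvCountLead cs + 1 else 0

def removeblankspace (string : String) : String :=
  let s1 := string.toList.reverse          -- string = string[::-1]
  let cont := pvCountLead s1               -- the for/break loop
  let s2 := s1.drop cont                   -- string = string[cont:]  (cont ≥ 0, so drop is exact)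
  String.ofList s2.reverse                     -- string = string[::-1]

-- ===== PORT B =====
-- the 'while i > 0 and string[i-1] == ' ': i -= 1' loop, recursing on i
-- (called with i ≤ length, so the getD default is never read)
def pvRstripIdx (cs : List Char) : Nat → Nat
  | 0 => 0
  | i + 1 => if cs.getD i ' ' == ' ' then pvRstripIdx cs i else i + 1

def removeblankspace_alt (string : String) : String :=
  let cs := string.toList
  String.ofList (cs.take (pvRstripIdx cs cs.length))   -- return string[:i]

-- ===== PRECONDITION & SPEC =====
def Spec_removeblankspace (string : String) (out : String) : Prop := out = removeblankspace_alt string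
instance (string : String) (out : String) : Decidable (Spec_removeblankspace string out) := by unfold Spec_removeblankspace; infer_instance

-- ===== CLAIM (what is proved, stated in full; the proofs are below) =====
def Claim_equal_removeblankspace : Prop := ∀ (string : String), Dom_removeblankspace string → Spec_removeblankspace string (removeblankspace string)

-- ===== LEMMAS AND PROOFS =====

lemma pvCountLead_eq_takeWhile (l : List Char) :
    pvCountLead l = (l.takeWhile (· == ' ')).length := by
  induction l with
  | nil => rfl
  | cons c cs ih =>
      by_cases h : (c == ' ') = true <;>
        simp only [pvCountLead, List.takeWhile, h, if_true, List.length_cons,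
          List.length_nil, ih] <;> rfl

lemma pvTakeWhileLen_le (l : List Char) : (l.takeWhile (· == ' ')).length ≤ l.length :=
  (List.takeWhile_sublist _).length_le

lemma pvDropWhile_eq_drop (l : List Char) :
    l.dropWhile (· == ' ') = l.drop (l.takeWhile (· == ' ')).length := by
  induction l with
  | nil => rfl
  | cons c cs ih =>
      by_cases h : (c == ' ') = true <;>
        simp only [List.dropWhile, List.takeWhile, h, List.length_cons,
          List.drop_succ_cons, List.length_nil, List.drop_zero, ih] <;> try rfl

lemma pvRstripIdx_eq (cs : List Char) (i : Nat) (h : i ≤ cs.length) :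
    pvRstripIdx cs i = i - ((cs.take i).reverse.takeWhile (· == ' ')).length := by
  induction i with
  | zero => rfl
  | succ j ih =>
      have hj : j < cs.length := h
      have htake : cs.take (j + 1) = cs.take j ++ [cs[j]] := List.take_succ_eq_append_getElem hj
      by_cases hc : cs[j] = ' '
      · have hg : cs.getD j ' ' = ' ' := by simp [List.getD, List.getElem?_eq_getElem hj, hc]
        have hlen : ((cs.take j).reverse.takeWhile (· == ' ')).length ≤ j := by
          calc ((cs.take j).reverse.takeWhile (· == ' ')).length
              ≤ (cs.take j).reverse.length := pvTakeWhileLen_le _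
            _ = (cs.take j).length := List.length_reverse
            _ ≤ j := by simp [List.length_take]
        simp only [pvRstripIdx, hg, beq_self_eq_true, if_true, ih (Nat.le_of_lt hj),
          htake, List.reverse_append, List.reverse_singleton, List.singleton_append,
          List.takeWhile, hc, beq_self_eq_true, List.length_cons]
        omega
      · have hg : cs.getD j ' ' = cs[j] := by simp [List.getD, List.getElem?_eq_getElem hj]
        have hb : (cs[j] == ' ') = false := by simp [hc]
        simp only [pvRstripIdx, hg, hb, if_false, htake, List.reverse_append,
          List.reverse_singleton, List.singleton_append, List.takeWhile]
        rfl

lemma pv_main (cs : List Char) :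
    (cs.reverse.drop (pvCountLead cs.reverse)).reverse
      = cs.take (pvRstripIdx cs cs.length) := by
  rw [pvCountLead_eq_takeWhile, pvRstripIdx_eq cs cs.length (le_refl _), List.take_length]
  rw [← pvDropWhile_eq_drop]
  set t := cs.reverse.takeWhile (· == ' ') with ht
  set d := cs.reverse.dropWhile (· == ' ') with hd
  have hcs : cs = d.reverse ++ t.reverse := by
    rw [ht, hd, ← List.reverse_append, List.takeWhile_append_dropWhile, List.reverse_reverse]
  rw [hcs, List.length_append, List.length_reverse, List.length_reverse,
    Nat.add_sub_cancel, List.take_append_of_le_length (by simp)]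
  simp

-- ===== VERDICT (by name: the statement is the Claim_ definition above) =====
theorem removeblankspace_spec : Claim_equal_removeblankspace := by
  intro s _
  show removeblankspace s = removeblankspace_alt s
  simp only [removeblankspace, removeblankspace_alt]
  rw [pv_main]
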